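-- pv_equiv track=rewrite | github.com/adilmatrix/Smart-Doctor | backend/test_cli/cli.py | tokenize_symptoms
-- ===== SOURCE A (Python) =====
-- def tokenize_symptoms(text):
--     """Tokenize symptoms by splitting on commas and handling special cases"""
--     if not isinstance(text, str):
--         return []
--     # Split on commas and handle potential semicolons
--     symptoms = []
--     for part in text.split(','):
--         # Further split on semicolons if present
--         subparts = part.split(';')
--         for subpart in subparts:
--             # Clean up the symptom text
--             symptom = subpart.strip().lower()
--             # Remove parenthetical descriptions
--             if '(' in symptom:
--                 symptom = symptom.split('(')[0].strip()
--             if symptom:  # Only add non-empty symptoms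
--                 symptoms.append(symptom)
--     return symptoms
-- ===== SOURCE B (Python) =====
-- def _flush(out, cur):
--     symptom = ''.join(cur).strip().lower()
--     if '(' in symptom:
--         symptom = symptom.split('(')[0].strip()
--     if symptom:
--         out.append(symptom)
--
--
-- def tokenize_symptoms(text):
--     """Single character-level scan: accumulate token chars, flush on ',' or ';'."""
--     if not isinstance(text, str):
--         return []
--     out = []
--     cur = []
--     for ch in text:
--         if ch == ',' or ch == ';':
--             _flush(out, cur)
--             cur = []
--         else:
--             cur.append(ch)
--     _flush(out, cur)
--     return out
-- ===== Notes on version B (the rewrite author's own statement) =====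
-- stated objective: alternative
-- what changed: Replaces A's nested comma-then-semicolon split loops over intermediate substring lists with a single hand-written character-level scanner that accumulates the current token and flushes it (strip/lower/paren-cut) at each delimiter character and at end of input.
import Mathlib
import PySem

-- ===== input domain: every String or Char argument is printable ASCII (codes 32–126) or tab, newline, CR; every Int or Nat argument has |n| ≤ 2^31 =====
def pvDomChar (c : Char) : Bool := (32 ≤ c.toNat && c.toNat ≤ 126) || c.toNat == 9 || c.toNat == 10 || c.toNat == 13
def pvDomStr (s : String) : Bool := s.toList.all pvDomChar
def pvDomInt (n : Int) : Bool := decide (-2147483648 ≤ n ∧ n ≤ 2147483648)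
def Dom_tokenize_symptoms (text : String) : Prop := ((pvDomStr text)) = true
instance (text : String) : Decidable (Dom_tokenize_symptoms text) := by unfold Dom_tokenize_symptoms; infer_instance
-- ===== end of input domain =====

-- B replaces A's nested two-level split loops with a single hand-written
-- character-level scanner that accumulates the current token and flushes it on each
-- delimiter and at end of input (objective: alternative; same cost).

-- ===== PORT A =====
-- literal transliteration of A: nested split loops, cleaning inlined in the inner loop
def tokenize_symptoms (text : String) : List String :=
  ((PySem.Str.split? text ",").getD []).foldl (fun symptoms part =>
    ((PySem.Str.split? part ";").getD []).foldl (fun symptoms subpart =>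
      let symptom := PySem.Str.lower (PySem.Str.strip subpart)
      let symptom :=
        if PySem.Str.isIn "(" symptom then
          PySem.Str.strip (((PySem.Str.split? symptom "(").getD []).headD "")
        else symptom
      if symptom ≠ "" then symptoms ++ [symptom] else symptoms) symptoms) []

-- ===== PORT B =====
-- helper _flush of Source B ('' .join(cur) = String.ofList cur; append ported as ++ [·])
def pvFlush (out : List String) (cur : List Char) : List String :=
  let symptom := PySem.Str.lower (PySem.Str.strip (String.ofList cur))
  let symptom :=
    if PySem.Str.isIn "(" symptom then
      PySem.Str.strip (((PySem.Str.split? symptom "(").getD []).headD "")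
    else symptom
  if symptom ≠ "" then out ++ [symptom] else out

-- literal transliteration of B: one fold over the characters carrying (out, cur),
-- flushing on each delimiter character, then a final flush
def tokenize_symptoms_alt (text : String) : List String :=
  let st := text.toList.foldl (fun (s : List String × List Char) ch =>
      if ch = ',' ∨ ch = ';' then (pvFlush s.1 s.2, ([] : List Char))
      else (s.1, s.2 ++ [ch])) (([] : List String), ([] : List Char))
  pvFlush st.1 st.2

-- ===== PRECONDITION & SPEC =====
def Spec_tokenize_symptoms (text : String) (out : List String) : Prop := out = tokenize_symptoms_alt text
instance (text : String) (out : List String) : Decidable (Spec_tokenize_symptoms text out) := by unfold Spec_tokenize_symptoms; infer_instance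

-- ===== CLAIM (what is proved, stated in full; the proofs are below) =====
def Claim_equal_tokenize_symptoms : Prop := ∀ (text : String), Dom_tokenize_symptoms text → Spec_tokenize_symptoms text (tokenize_symptoms text)

-- ===== LEMMAS AND PROOFS =====

-- simple structural recursion characterising split on a single-character separator
def pvSplitc (d : Char) : List Char → List (List Char)
  | [] => [[]]
  | c :: s => if c = d then [] :: pvSplitc d s else (pvSplitc d s).modifyHead (c :: ·)

-- split on both delimiters at once (the common middle form)
def pvSplit2 : List Char → List (List Char)
  | [] => [[]]
  | c :: s => if c = ',' ∨ c = ';' then [] :: pvSplit2 s else (pvSplit2 s).modifyHead (c :: ·)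

lemma pvSplitc_ne_nil (d : Char) (l : List Char) : pvSplitc d l ≠ [] := by
  cases l with
  | nil => simp [pvSplitc]
  | cons c s =>
    simp only [pvSplitc]
    split
    · simp
    · cases h : pvSplitc d s with
      | nil => exact absurd h (pvSplitc_ne_nil d s)
      | cons a as => simp

lemma pv_go_single (d : Char) : ∀ (fuel : Nat) (l cur : List Char) (acc : List (List Char)), l.length ≤ fuel →
    PySem.Chars.splitOn.go [d] fuel l cur acc
      = acc.reverse ++ (pvSplitc d l).modifyHead (cur.reverse ++ ·) := by
  intro fuel
  induction fuel with
  | zero =>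
    intro l cur acc h
    have : l = [] := List.length_eq_zero_iff.mp (Nat.le_zero.mp h)
    subst this
    simp [PySem.Chars.splitOn.go, pvSplitc]
  | succ f ih =>
    intro l cur acc h
    cases l with
    | nil => simp [PySem.Chars.splitOn.go, pvSplitc]
    | cons c rest =>
      have hlen : rest.length ≤ f := by simpa using h
      by_cases hc : d = c
      · subst hc
        rw [show PySem.Chars.splitOn.go [d] (f+1) (d :: rest) cur acc
              = PySem.Chars.splitOn.go [d] f rest [] (cur.reverse :: acc) by
            simp [PySem.Chars.splitOn.go, List.isPrefixOf]]
        rw [ih rest [] (cur.reverse :: acc) hlen]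
        cases hsp : pvSplitc d rest with
        | nil => exact absurd hsp (pvSplitc_ne_nil d rest)
        | cons a as => simp [pvSplitc, hsp]
      · rw [show PySem.Chars.splitOn.go [d] (f+1) (c :: rest) cur acc
              = PySem.Chars.splitOn.go [d] f rest (c :: cur) acc by
            simp [PySem.Chars.splitOn.go, List.isPrefixOf, hc]]
        rw [ih rest (c :: cur) acc hlen]
        cases hsp : pvSplitc d rest with
        | nil => exact absurd hsp (pvSplitc_ne_nil d rest)
        | cons a as =>
          simp [pvSplitc, hsp, Ne.symm hc, List.modifyHead]

lemma pvSplitOn_single (d : Char) (l : List Char) :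
    PySem.Chars.splitOn l [d] = pvSplitc d l := by
  rw [PySem.Chars.splitOn, pv_go_single d (l.length + 1) l [] [] (by omega)]
  cases hsp : pvSplitc d l with
  | nil => exact absurd hsp (pvSplitc_ne_nil d l)
  | cons a as => simp

-- A's tokenization (nested split) is pvSplit2
lemma pvFlatMap_eq_split2 (l : List Char) :
    (pvSplitc ',' l).flatMap (fun p => pvSplitc ';' p) = pvSplit2 l := by
  induction l with
  | nil => simp [pvSplitc, pvSplit2]
  | cons c s ih =>
    by_cases hc : c = ','
    · subst hc; simp [pvSplitc, pvSplit2, ih]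
    · cases hsp : pvSplitc ',' s with
      | nil => exact absurd hsp (pvSplitc_ne_nil ',' s)
      | cons p ps =>
        rw [hsp] at ih
        by_cases hc2 : c = ';'
        · subst hc2
          simp only [pvSplitc, if_neg hc, hsp, List.modifyHead, List.flatMap_cons] at *
          simp [pvSplit2, ← ih]
        · cases hq : pvSplitc ';' p with
          | nil => exact absurd hq (pvSplitc_ne_nil ';' p)
          | cons q qs =>
            simp only [pvSplitc, if_neg hc, hsp, List.modifyHead, List.flatMap_cons] at *
            simp only [pvSplit2, hc, hc2, or_self, if_false, ← ih, hq]
            simp [List.modifyHead]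

-- folding the inner loop over every part of a flatMap
lemma pv_foldl_flatMap {α β γ : Type} (g : α → List β) (h : γ → β → γ) (xs : List α) (i : γ) :
    xs.foldl (fun a x => (g x).foldl h a) i = (xs.flatMap g).foldl h i := by
  induction xs generalizing i with
  | nil => simp
  | cons x xs ih => simp [List.flatMap_cons, List.foldl_append, ih]

-- B's character scan, characterised: it folds pvFlush over the pvSplit2 tokens,
-- the pending prefix cur glued onto the first token
lemma pv_scan : ∀ (l : List Char) (out : List String) (cur : List Char),
    pvFlush (l.foldl (fun (s : List String × List Char) ch =>
        if ch = ',' ∨ ch = ';' then (pvFlush s.1 s.2, ([] : List Char))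
        else (s.1, s.2 ++ [ch])) (out, cur)).1
      (l.foldl (fun (s : List String × List Char) ch =>
        if ch = ',' ∨ ch = ';' then (pvFlush s.1 s.2, ([] : List Char))
        else (s.1, s.2 ++ [ch])) (out, cur)).2
      = ((pvSplit2 l).modifyHead (cur ++ ·)).foldl pvFlush out := by
  intro l
  induction l with
  | nil => intro out cur; simp [pvSplit2, List.modifyHead]
  | cons c s ih =>
    intro out cur
    by_cases hc : c = ',' ∨ c = ';'
    · simp only [List.foldl_cons, if_pos hc]
      rw [ih (pvFlush out cur) []]
      have h1 : pvSplit2 (c :: s) = [] :: pvSplit2 s := by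
        simp [pvSplit2, hc]
      rw [h1]
      cases pvSplit2 s <;> simp [List.modifyHead]
    · simp only [List.foldl_cons, if_neg hc]
      rw [ih out (cur ++ [c])]
      have h1 : pvSplit2 (c :: s) = (pvSplit2 s).modifyHead (c :: ·) := by
        simp [pvSplit2, hc]
      rw [h1]
      cases pvSplit2 s <;> simp [List.modifyHead]

-- ===== VERDICT (by name: the statement is the Claim_ definition above) =====
theorem tokenize_symptoms_spec : Claim_equal_tokenize_symptoms := by
  intro text _
  show tokenize_symptoms text = tokenize_symptoms_alt text
  unfold tokenize_symptoms tokenize_symptoms_alt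
  have hsplit : ∀ (t : String),
      (PySem.Str.split? t ",").getD [] = List.map String.ofList (pvSplitc ',' t.toList) := by
    intro t
    simp [PySem.Str.split?, PySem.Chars.split?, pvSplitOn_single,
      show ("," : String).toList = [','] from by decide]
  have hsemi : ∀ (t : String),
      (PySem.Str.split? t ";").getD [] = List.map String.ofList (pvSplitc ';' t.toList) := by
    intro t
    simp [PySem.Str.split?, PySem.Chars.split?, pvSplitOn_single,
      show (";" : String).toList = [';'] from by decide]
  simp only [hsplit, hsemi]
  rw [pv_scan text.toList [] []]
  have h2 : (pvSplit2 text.toList).modifyHead (([] : List Char) ++ ·) = pvSplit2 text.toList := by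
    cases pvSplit2 text.toList <;> simp [List.modifyHead]
  rw [h2]
  rw [List.foldl_map]
  simp only [String.toList_ofList]
  rw [pv_foldl_flatMap (fun p => (pvSplitc ';' p).map String.ofList)
        (fun symptoms subpart =>
          let symptom := PySem.Str.lower (PySem.Str.strip subpart)
          let symptom :=
            if PySem.Str.isIn "(" symptom then
              PySem.Str.strip (((PySem.Str.split? symptom "(").getD []).headD "")
            else symptom
          if symptom ≠ "" then symptoms ++ [symptom] else symptoms)]
  rw [show (pvSplitc ',' text.toList).flatMap (fun p => (pvSplitc ';' p).map String.ofList)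
        = ((pvSplitc ',' text.toList).flatMap (fun p => pvSplitc ';' p)).map String.ofList from by
      simp [List.map_flatMap]]
  rw [pvFlatMap_eq_split2, List.foldl_map]
  rfl
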